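-- pv_equiv track=rewrite | github.com/xymsyh/fs_api_example | 知识空间节点处理/知识节点2_判断更新.py | check_for_changes
-- ===== SOURCE A (Python) =====
-- def check_for_changes(old_data, new_data):
--     changes = {}
--     latest_edit_time = None
--
--     for node_token, new_item in new_data.items():
--         if node_token in old_data:
--             if new_item['obj_edit_time'] != old_data[node_token]['obj_edit_time']:
--                 changes[node_token] = new_item
--         else:
--             changes[node_token] = new_item
--
--         # 更新最新的编辑时间
--         if latest_edit_time is None or new_item['obj_edit_time'] > latest_edit_time:
--             latest_edit_time = new_item['obj_edit_time']
--
--     return changes, latest_edit_time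
-- ===== SOURCE B (Python) =====
-- def check_for_changes(old_data, new_data):
--     # Start from a copy of new_data and DELETE the entries that are unchanged,
--     # by scanning old_data; deletion preserves the insertion order of the rest.
--     changes = dict(new_data)
--     for token, old_item in old_data.items():
--         if token in changes and changes[token]['obj_edit_time'] == old_item['obj_edit_time']:
--             del changes[token]
--     latest_edit_time = max((item['obj_edit_time'] for item in new_data.values()),
--                            default=None)
--     return changes, latest_edit_time
-- ===== Notes on version B (the rewrite author's own statement) =====
-- stated objective: alternative
-- what changed: Instead of scanning new_data and selecting changed/new entries while threading a running maximum, B copies new_data and scans OLD_data, deleting from the copy each entry whose edit time is unchanged (subtractive, opposite traversal), and computes the latest time separately with max(..., default=None).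
import Mathlib
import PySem

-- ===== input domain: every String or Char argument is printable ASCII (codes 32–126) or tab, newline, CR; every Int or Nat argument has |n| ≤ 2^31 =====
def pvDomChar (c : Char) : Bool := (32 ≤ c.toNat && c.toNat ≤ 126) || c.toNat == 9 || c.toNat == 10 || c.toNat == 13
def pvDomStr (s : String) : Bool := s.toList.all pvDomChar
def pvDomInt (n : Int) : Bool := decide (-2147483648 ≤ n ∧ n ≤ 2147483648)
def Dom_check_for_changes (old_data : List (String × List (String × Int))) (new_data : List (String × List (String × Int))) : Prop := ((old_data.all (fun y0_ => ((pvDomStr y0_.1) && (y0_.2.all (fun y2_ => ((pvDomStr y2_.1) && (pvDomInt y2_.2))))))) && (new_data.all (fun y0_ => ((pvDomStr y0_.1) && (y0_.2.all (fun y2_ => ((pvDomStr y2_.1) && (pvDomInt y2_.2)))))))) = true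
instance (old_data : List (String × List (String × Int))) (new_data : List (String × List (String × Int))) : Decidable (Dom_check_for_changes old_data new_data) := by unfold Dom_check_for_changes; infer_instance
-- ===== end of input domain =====

-- B is subtractive instead of selective: it copies new_data and scans OLD_data deleting the
-- unchanged entries, then takes max(..., default=None) separately; same cost, different traversal.

-- ===== PORT A =====
-- new_item['obj_edit_time'] — exact under Pre_, which guarantees the key is present
def pvEtA (d : List (String × Int)) : Int := (PySem.Dict.ofList d).getD "obj_edit_time" 0

-- A's loop body: conditionally record the change, then update the running latest time
def pvStepA (dOld : PySem.Dict String (List (String × Int)))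
    (st : PySem.Dict String (List (String × Int)) × Option Int)
    (kv : String × List (String × Int)) :
    PySem.Dict String (List (String × Int)) × Option Int :=
  -- if node_token in old_data: compare edit times; else always record
  let changes :=
    if (dOld.get? kv.1).isSome then
      if pvEtA kv.2 ≠ pvEtA ((dOld.get? kv.1).getD []) then st.1.insert kv.1 kv.2 else st.1
    else st.1.insert kv.1 kv.2
  -- if latest_edit_time is None or new_item['obj_edit_time'] > latest_edit_time
  let latest :=
    match st.2 with
    | none => some (pvEtA kv.2)
    | some t => if pvEtA kv.2 > t then some (pvEtA kv.2) else some t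
  (changes, latest)

def check_for_changes (old_data : List (String × List (String × Int))) (new_data : List (String × List (String × Int))) : (List (String × List (String × Int))) × Option Int :=
  let dOld := PySem.Dict.ofList old_data
  let r := (PySem.Dict.ofList new_data).items.foldl (pvStepA dOld) (PySem.Dict.empty, none)
  (r.1.items, r.2)

-- ===== PORT B =====
def pvEtB (d : List (String × Int)) : Int := (PySem.Dict.ofList d).getD "obj_edit_time" 0

-- B's loop body over old_data.items(): delete the token from the copy when its time is unchanged
def pvStepB (c : PySem.Dict String (List (String × Int)))
    (kv : String × List (String × Int)) : PySem.Dict String (List (String × Int)) :=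
  if c.contains kv.1 && (pvEtB ((c.get? kv.1).getD []) == pvEtB kv.2) then c.erase kv.1 else c

def check_for_changes_alt (old_data : List (String × List (String × Int))) (new_data : List (String × List (String × Int))) : (List (String × List (String × Int))) × Option Int :=
  -- changes = dict(new_data); for token, old_item in old_data.items(): conditionally delete
  let changes := (PySem.Dict.ofList old_data).items.foldl pvStepB (PySem.Dict.ofList new_data)
  (changes.items,
   PySem.List.max? ((PySem.Dict.ofList new_data).values.map pvEtB) (fun x => x))

-- ===== PRECONDITION & SPEC =====
-- Pre_ excludes exactly the inputs on which Python A raises KeyError: an entry of the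
-- (deduplicated) new dict whose value lacks the 'obj_edit_time' key, or whose token is in
-- old_data while old_data's value lacks that key.
def Pre_check_for_changes (old_data : List (String × List (String × Int))) (new_data : List (String × List (String × Int))) : Prop :=
  ∀ p ∈ (PySem.Dict.ofList new_data).items,
    "obj_edit_time" ∈ p.2.map (·.1) ∧
    (∀ ov ∈ (PySem.Dict.ofList old_data).get? p.1, "obj_edit_time" ∈ ov.map (·.1))
instance (old_data : List (String × List (String × Int))) (new_data : List (String × List (String × Int))) : Decidable (Pre_check_for_changes old_data new_data) := by unfold Pre_check_for_changes; infer_instance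

def pvWitness_check_for_changes : (List (String × List (String × Int))) × (List (String × List (String × Int))) :=
  ([("a", [("obj_edit_time", 1)])],
   [("a", [("obj_edit_time", 2)]), ("b", [("obj_edit_time", 5)])])

def Spec_check_for_changes (old_data : List (String × List (String × Int))) (new_data : List (String × List (String × Int))) (out : (List (String × List (String × Int))) × Option Int) : Prop := out = check_for_changes_alt old_data new_data
instance (old_data : List (String × List (String × Int))) (new_data : List (String × List (String × Int))) (out : (List (String × List (String × Int))) × Option Int) : Decidable (Spec_check_for_changes old_data new_data out) := by unfold Spec_check_for_changes; infer_instance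

-- ===== CLAIM (what is proved, stated in full; the proofs are below) =====
def Claim_equal_check_for_changes : Prop := ∀ (old_data : List (String × List (String × Int))) (new_data : List (String × List (String × Int))), Dom_check_for_changes old_data new_data → Pre_check_for_changes old_data new_data → Spec_check_for_changes old_data new_data (check_for_changes old_data new_data)

-- ===== LEMMAS AND PROOFS =====

theorem pv_witness_ok :
    Dom_check_for_changes pvWitness_check_for_changes.1 pvWitness_check_for_changes.2 ∧
    Pre_check_for_changes pvWitness_check_for_changes.1 pvWitness_check_for_changes.2 := by
  decide

-- the common filter both sides reduce to: keep entries new or with a differing edit time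
def pvPred (dOld : PySem.Dict String (List (String × Int)))
    (kv : String × List (String × Int)) : Bool :=
  match dOld.get? kv.1 with
  | none => true
  | some ov => decide (pvEtB kv.2 ≠ pvEtB ov)

-- the changes-dict component of A's fold appends exactly the filtered entries
theorem pv_fold_fst (dOld : PySem.Dict String (List (String × Int)))
    (l : List (String × List (String × Int))) :
    ∀ (d : PySem.Dict String (List (String × Int))) (o : Option Int),
      (l.map (·.1)).Nodup → (∀ k ∈ l.map (·.1), d.contains k = false) →
      (l.foldl (pvStepA dOld) (d, o)).1.items = d.items ++ l.filter (pvPred dOld) := by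
  induction l with
  | nil => intro d o _ _; simp
  | cons kv t ih =>
    intro d o hnd hdisj
    simp only [List.map_cons, List.nodup_cons] at hnd
    have hkv : d.contains kv.1 = false := hdisj kv.1 (List.mem_cons_self)
    have hstep : ∀ v, (d.insert kv.1 v).items = d.items ++ [(kv.1, v)] :=
      fun v => PySem.Dict.items_insert_of_not_contains d v hkv
    have hdisj' : ∀ v, ∀ k ∈ t.map (·.1), (d.insert kv.1 v).contains k = false := by
      intro v k hk
      rw [PySem.Dict.contains_insert]
      have hne : k ≠ kv.1 := fun h => hnd.1 (h ▸ hk)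
      simp [hne, hdisj k (List.mem_cons_of_mem _ hk)]
    simp only [List.foldl_cons, List.filter_cons]
    by_cases hp : pvPred dOld kv = true
    · have : (pvStepA dOld (d, o) kv).1 = d.insert kv.1 kv.2 := by
        simp only [pvStepA, pvPred, pvEtA, pvEtB] at hp ⊢
        cases h : dOld.get? kv.1 with
        | none => simp
        | some ov => rw [h] at hp; simp at hp; simp [hp]
      rcases hkvst : pvStepA dOld (d, o) kv with ⟨d', o'⟩
      rw [hkvst] at this; simp at this; subst this
      rw [ih _ _ hnd.2 (hdisj' kv.2), hstep, hp]
      simp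
    · have : (pvStepA dOld (d, o) kv).1 = d := by
        simp only [pvStepA, pvPred, pvEtA, pvEtB] at hp ⊢
        cases h : dOld.get? kv.1 with
        | none => rw [h] at hp; simp at hp
        | some ov => rw [h] at hp; simp at hp; simp [hp]
      rcases hkvst : pvStepA dOld (d, o) kv with ⟨d', o'⟩
      rw [hkvst] at this; simp at this; subst this
      rw [ih _ _ hnd.2 (fun k hk => hdisj k (List.mem_cons_of_mem _ hk))]
      simp [hp]

-- the latest-time component of A's fold ignores the changes component
theorem pv_fold_snd (dOld : PySem.Dict String (List (String × Int)))
    (l : List (String × List (String × Int))) :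
    ∀ (d : PySem.Dict String (List (String × Int))) (o : Option Int),
      (l.foldl (pvStepA dOld) (d, o)).2 =
        l.foldl (fun (a : Option Int) kv =>
          match a with
          | none => some (pvEtA kv.2)
          | some t => if pvEtA kv.2 > t then some (pvEtA kv.2) else some t) o := by
  induction l with
  | nil => intro d o; rfl
  | cons kv t ih =>
    intro d o
    simp only [List.foldl_cons]
    exact ih _ _

-- A's running-max step from a some-accumulator is List.foldl max
theorem pv_max_some (l : List (String × List (String × Int))) :
    ∀ (x : Int),
      l.foldl (fun (a : Option Int) kv =>
          match a with
          | none => some (pvEtA kv.2)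
          | some t => if pvEtA kv.2 > t then some (pvEtA kv.2) else some t) (some x) =
      some ((l.map (fun kv => pvEtA kv.2)).foldl max x) := by
  induction l with
  | nil => intro x; rfl
  | cons kv t ih =>
    intro x
    simp only [List.foldl_cons, List.map_cons]
    have : (if pvEtA kv.2 > x then some (pvEtA kv.2) else some x) = some (max x (pvEtA kv.2)) := by
      by_cases h : pvEtA kv.2 > x
      · simp [h, max_eq_right (le_of_lt h)]
      · simp [h, max_eq_left (not_lt.mp h)]
    rw [this, ih]

-- A's running maximum equals B's max?(..., default=None)
theorem pv_max_eq (l : List (String × List (String × Int))) :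
    l.foldl (fun (a : Option Int) kv =>
        match a with
        | none => some (pvEtA kv.2)
        | some t => if pvEtA kv.2 > t then some (pvEtA kv.2) else some t) none =
    PySem.List.max? (l.map (fun kv => pvEtB kv.2)) (fun x => x) := by
  cases l with
  | nil => rfl
  | cons kv t =>
    simp only [List.foldl_cons, List.map_cons]
    rw [pv_max_some, PySem.List.max?_id_cons]
    simp [pvEtA, pvEtB]

-- erasing preserves Nodup keys
theorem pv_nodup_erase (c : PySem.Dict String (List (String × Int))) (k : String)
    (h : c.keys.Nodup) : (c.erase k).keys.Nodup := by
  simp only [PySem.Dict.keys, PySem.Dict.erase] at h ⊢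
  exact (List.Sublist.map (fun p : String × List (String × Int) => p.1) List.filter_sublist).nodup h

-- B's deletion fold over the old entries leaves exactly the filtered copy of new_data
theorem pv_erase_fold (l : List (String × List (String × Int))) :
    ∀ (c : PySem.Dict String (List (String × Int))),
      c.keys.Nodup → (l.map (·.1)).Nodup →
      (l.foldl pvStepB c).items =
        c.items.filter (fun p =>
          match (PySem.Dict.mk l : PySem.Dict String (List (String × Int))).get? p.1 with
          | none => true
          | some ov => decide (pvEtB p.2 ≠ pvEtB ov)) := by
  induction l with
  | nil =>
    intro c _ _
    simp [PySem.Dict.get?]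
  | cons kv t ih =>
    intro c hc hnd
    simp only [List.map_cons, List.nodup_cons] at hnd
    have hcons : ∀ (x : String),
        (PySem.Dict.mk (kv :: t) : PySem.Dict String (List (String × Int))).get? x =
          if kv.1 == x then some kv.2 else (PySem.Dict.mk t : PySem.Dict String (List (String × Int))).get? x := by
      intro x
      rcases kv with ⟨k, v⟩
      exact PySem.Dict.get?_mk_cons _ _ _ _
    simp only [List.foldl_cons]
    by_cases hm : c.contains kv.1 = true
    · by_cases heq : pvEtB ((c.get? kv.1).getD []) = pvEtB kv.2
      · -- delete kv.1: pvStepB erases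
        have hb : pvStepB c kv = c.erase kv.1 := by
          simp [pvStepB, hm, heq]
        rw [hb, ih _ (pv_nodup_erase c kv.1 hc) hnd.2]
        simp only [PySem.Dict.erase, List.filter_filter]
        apply List.filter_congr
        intro p hp
        obtain ⟨pk, pv⟩ := p
        by_cases hpk : pk = kv.1
        · -- dropped on both sides: times equal
          have hget : c.get? pk = some pv := PySem.Dict.get?_of_mem_items c hp hc
          have : pvEtB pv = pvEtB kv.2 := by
            rw [hpk] at hget; rw [hget] at heq; simpa using heq
          simp [hcons, hpk, this]
        · have : (kv.1 == pk) = false := by simp [Ne.symm hpk]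
          simp [hcons, this, hpk]
      · -- times differ: keep, c unchanged
        have hb : pvStepB c kv = c := by
          simp [pvStepB, heq]
        rw [hb, ih _ hc hnd.2]
        apply List.filter_congr
        intro p hp
        obtain ⟨pk, pv⟩ := p
        by_cases hpk : pk = kv.1
        · have hget : c.get? pk = some pv := PySem.Dict.get?_of_mem_items c hp hc
          have hpe : pvEtB pv ≠ pvEtB kv.2 := by
            rw [hpk] at hget; rw [hget] at heq; simpa using heq
          have htn : (PySem.Dict.mk t : PySem.Dict String (List (String × Int))).get? pk = none := by
            rw [PySem.Dict.get?_eq_none_iff_not_mem_keys]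
            simpa [PySem.Dict.keys, hpk] using hnd.1
          rw [hpk] at htn
          simp [hcons, hpk, hpe, htn]
        · have : (kv.1 == pk) = false := by simp [Ne.symm hpk]
          simp [hcons, this]
    · -- token not in the copy: skip; its key cannot occur among c.items either
      have hb : pvStepB c kv = c := by
        simp [pvStepB, hm]
      rw [hb, ih _ hc hnd.2]
      apply List.filter_congr
      intro p hp
      have hpk : p.1 ≠ kv.1 := by
        intro h
        have : c.contains p.1 = true := by
          rw [PySem.Dict.contains_iff_mem_keys]
          exact List.mem_map_of_mem hp
        rw [h] at this; exact absurd this (by simp [hm])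
      have : (kv.1 == p.1) = false := by simp [Ne.symm hpk]
      simp [hcons, this]

-- ===== VERDICT (by name: the statement is the Claim_ definition above) =====
theorem check_for_changes_spec : Claim_equal_check_for_changes := by
  intro old_data new_data _ _
  unfold Spec_check_for_changes check_for_changes check_for_changes_alt
  dsimp only
  have hndN : (((PySem.Dict.ofList new_data).items.map (·.1)).Nodup) := by
    have := PySem.Dict.nodup_keys_ofList new_data
    simpa [PySem.Dict.keys] using this
  have hndO : (((PySem.Dict.ofList old_data).items.map (·.1)).Nodup) := by
    have := PySem.Dict.nodup_keys_ofList old_data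
    simpa [PySem.Dict.keys] using this
  have h1 := pv_fold_fst (PySem.Dict.ofList old_data) (PySem.Dict.ofList new_data).items
    PySem.Dict.empty none hndN (by intro k _; simp)
  have h2 := pv_fold_snd (PySem.Dict.ofList old_data) (PySem.Dict.ofList new_data).items
    PySem.Dict.empty none
  have h3 := pv_erase_fold (PySem.Dict.ofList old_data).items (PySem.Dict.ofList new_data)
    (by simpa [PySem.Dict.keys] using hndN) hndO
  refine Prod.ext ?_ ?_
  · -- both sides are the same filter of the new items
    rw [h1, h3]
    simp only [List.nil_append, PySem.Dict.empty]
    apply List.filter_congr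
    intro p _
    have : (PySem.Dict.mk (PySem.Dict.ofList old_data).items : PySem.Dict String (List (String × Int)))
        = PySem.Dict.ofList old_data := rfl
    simp [pvPred, this]
  · rw [h2, pv_max_eq]
    simp [PySem.Dict.values, List.map_map, Function.comp_def]
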